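-- pv_equiv track=rewrite | github.com/lebowitz/drmetablog | truly_rare_words.py | find_article_examples
-- ===== SOURCE A (Python) =====
-- from collections import Counter, defaultdict
--
-- def find_article_examples(article_words, target_words):
--     """Find example articles containing rare words."""
--     word_to_articles = defaultdict(list)
--
--     for filename, words in article_words.items():
--         for word in words:
--             if word in target_words:
--                 if filename not in word_to_articles[word]:
--                     word_to_articles[word].append(filename)
--
--     return word_to_articles
-- ===== SOURCE B (Python) =====
-- from collections import defaultdict
--
-- def find_article_examples(article_words, target_words):
--     """Find example articles containing rare words."""
--     targets = set(target_words)
--     # Pass 1: the target words that occur somewhere, in first-occurrence order.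
--     order = []
--     seen = set()
--     for words in article_words.values():
--         for word in words:
--             if word in targets and word not in seen:
--                 seen.add(word)
--                 order.append(word)
--     # Pass 2: one scan filling an inverted index keyed by those words.
--     files = {word: [] for word in order}
--     for fname, words in article_words.items():
--         for word in dict.fromkeys(words):
--             if word in files:
--                 files[word].append(fname)
--     return defaultdict(list, files)
-- ===== Notes on version B (the rewrite author's own statement) =====
-- stated objective: alternative
-- what changed: A builds the defaultdict incrementally inside one nested scan, searching target_words and each value list per occurrence; B makes two linear passes with set/ordered-dedup lookups: a first-occurrence scan fixing the key order, then an inverted-index scan appending each filename once per contained key.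
import Mathlib
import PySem

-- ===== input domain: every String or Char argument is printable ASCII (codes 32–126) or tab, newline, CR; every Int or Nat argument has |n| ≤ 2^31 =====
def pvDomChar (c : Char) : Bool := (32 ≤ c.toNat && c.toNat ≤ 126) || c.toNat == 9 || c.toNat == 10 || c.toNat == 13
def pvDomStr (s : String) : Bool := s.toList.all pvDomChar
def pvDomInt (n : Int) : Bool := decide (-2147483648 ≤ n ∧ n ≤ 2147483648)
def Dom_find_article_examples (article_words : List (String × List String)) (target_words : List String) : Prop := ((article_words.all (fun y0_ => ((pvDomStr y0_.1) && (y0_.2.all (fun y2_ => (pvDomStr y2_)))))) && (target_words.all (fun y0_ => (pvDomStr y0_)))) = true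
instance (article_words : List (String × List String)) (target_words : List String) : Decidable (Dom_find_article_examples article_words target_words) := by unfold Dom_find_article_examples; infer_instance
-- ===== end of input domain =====

-- B replaces A's incremental defaultdict-of-deduped-lists with two passes: a set-based
-- first-occurrence scan for the key order, then one comprehension per key (objective: alternative).


-- ===== PORT A =====
-- one step of A's inner loop: 'if word in target_words: if filename not in word_to_articles[word]: …append(filename)'
-- (the defaultdict access word_to_articles[word] creates the key, hence the unconditional insert)
def pvAStep (target_words : List String) (filename : String)
    (d : PySem.Dict String (List String)) (word : String) : PySem.Dict String (List String) :=
  if word ∈ target_words then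
    let cur := d.getD word []
    let d1 := d.insert word cur
    if filename ∈ cur then d1 else d1.insert word (cur ++ [filename])
  else d

def find_article_examples (article_words : List (String × List String)) (target_words : List String) : List (String × List String) :=
  (article_words.foldl (fun d fw => fw.2.foldl (pvAStep target_words fw.1) d)
    (PySem.Dict.empty : PySem.Dict String (List String))).items

-- ===== PORT B =====
-- one step of B's first pass: 'if word in targets and word not in seen: seen.add(word); order.append(word)'
def pvBOrderStep (targets : PySem.Set String)
    (st : List String × PySem.Set String) (word : String) : List String × PySem.Set String :=
  if word ∈ targets ∧ word ∉ st.2 then (st.1 ++ [word], PySem.Set.add st.2 word) else st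

-- one step of B's second pass: 'if word in files: files[word].append(fname)'
def pvBCollectStep (filename : String)
    (d : PySem.Dict String (List String)) (word : String) : PySem.Dict String (List String) :=
  if d.contains word then d.modify word [] (· ++ [filename]) else d

def find_article_examples_alt (article_words : List (String × List String)) (target_words : List String) : List (String × List String) :=
  (article_words.foldl
      (fun d fw => (PySem.List.dedup fw.2).foldl (pvBCollectStep fw.1) d)
      -- 'files = {word: [] for word in order}', with order from B's first pass
      ((article_words.foldl
            (fun st fw => fw.2.foldl (pvBOrderStep (PySem.Set.ofList target_words)) st)
            (([], PySem.Set.empty) : List String × PySem.Set String)).1.foldl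
        (fun d w => d.insert w ([] : List String))
        (PySem.Dict.empty : PySem.Dict String (List String)))).items

-- ===== PRECONDITION & SPEC =====
-- Pre_ requires pairwise-distinct filenames: this is the representation invariant of the Python
-- dict 'article_words' (dict keys are unique), not a narrowing of A's domain.
def Pre_find_article_examples (article_words : List (String × List String)) (target_words : List String) : Prop :=
  (article_words.map Prod.fst).Nodup
instance (article_words : List (String × List String)) (target_words : List String) : Decidable (Pre_find_article_examples article_words target_words) := by unfold Pre_find_article_examples; infer_instance

def pvWitness_find_article_examples : (List (String × List String)) × List String :=
  ([("a.txt", ["rare", "word"]), ("b.txt", ["rare"])], ["rare"])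

def Spec_find_article_examples (article_words : List (String × List String)) (target_words : List String) (out : List (String × List String)) : Prop := out = find_article_examples_alt article_words target_words
instance (article_words : List (String × List String)) (target_words : List String) (out : List (String × List String)) : Decidable (Spec_find_article_examples article_words target_words out) := by unfold Spec_find_article_examples; infer_instance

-- ===== CLAIM (what is proved, stated in full; the proofs are below) =====
def Claim_equal_find_article_examples : Prop := ∀ (article_words : List (String × List String)) (target_words : List String), Dom_find_article_examples article_words target_words → Pre_find_article_examples article_words target_words → Spec_find_article_examples article_words target_words (find_article_examples article_words target_words)

-- ===== LEMMAS AND PROOFS =====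

-- the order-accumulating step / folds, used to describe both programs
def pvOStep (tw : List String) (o : List String) (w : String) : List String :=
  if w ∈ tw ∧ w ∉ o then o ++ [w] else o

def pvWFold (tw : List String) (ws : List String) (o : List String) : List String :=
  ws.foldl (pvOStep tw) o

def pvAFold (tw : List String) (aw : List (String × List String)) (o : List String) : List String :=
  aw.foldl (fun o fw => pvWFold tw fw.2 o) o

theorem pvWFold_mem (tw : List String) (ws : List String) :
    ∀ (o : List String) (w : String), w ∈ pvWFold tw ws o ↔ w ∈ o ∨ (w ∈ ws ∧ w ∈ tw) := by
  induction ws with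
  | nil => simp [pvWFold]
  | cons x ws ih =>
    intro o w
    simp only [pvWFold, List.foldl_cons]
    rw [show ws.foldl (pvOStep tw) (pvOStep tw o x) = pvWFold tw ws (pvOStep tw o x) from rfl,
      ih]
    unfold pvOStep
    by_cases hx : x ∈ tw ∧ x ∉ o
    · rw [if_pos hx]
      simp only [List.mem_append, List.mem_cons]
      by_cases hwx : w = x <;> subst_eqs <;> tauto
    · rw [if_neg hx]
      simp only [List.mem_cons]
      by_cases hwx : w = x
      · subst hwx; by_cases ho : w ∈ o <;> tauto
      · tauto

theorem pvWFold_nodup (tw : List String) (ws : List String) :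
    ∀ (o : List String), o.Nodup → (pvWFold tw ws o).Nodup := by
  induction ws with
  | nil => intro o h; simpa [pvWFold] using h
  | cons x ws ih =>
    intro o h
    simp only [pvWFold, List.foldl_cons]
    apply ih
    unfold pvOStep
    by_cases hx : x ∈ tw ∧ x ∉ o
    · rw [if_pos hx]
      refine h.append (List.nodup_singleton x) ?_
      intro a ha hax
      simp only [List.mem_singleton] at hax
      exact hx.2 (hax ▸ ha)
    · rw [if_neg hx]
      exact h

theorem pvAFold_mem_tw (tw : List String) (aw : List (String × List String)) :
    ∀ (o : List String) (w : String), (∀ u ∈ o, u ∈ tw) → w ∈ pvAFold tw aw o → w ∈ tw := by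
  induction aw with
  | nil => intro o w ho h; exact ho w (by simpa [pvAFold] using h)
  | cons fw rest ih =>
    intro o w ho h
    refine ih (pvWFold tw fw.2 o) w ?_ (by simpa [pvAFold] using h)
    intro u hu
    rcases (pvWFold_mem tw fw.2 o u).1 hu with h1 | h2
    · exact ho u h1
    · exact h2.2

theorem pvAFold_nodup (tw : List String) (aw : List (String × List String)) :
    ∀ (o : List String), o.Nodup → (pvAFold tw aw o).Nodup := by
  induction aw with
  | nil => intro o h; simpa [pvAFold] using h
  | cons fw rest ih =>
    intro o h
    simpa [pvAFold] using ih (pvWFold tw fw.2 o) (pvWFold_nodup tw fw.2 o h)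

-- B's first pass with its (order, seen) pair is the plain order fold run twice
theorem pvPairFold_words (tw : List String) (ws : List String) :
    ∀ (o : List String),
      ws.foldl (pvBOrderStep (PySem.Set.ofList tw)) (o, o) = (pvWFold tw ws o, pvWFold tw ws o) := by
  induction ws with
  | nil => intro o; simp [pvWFold]
  | cons x ws ih =>
    intro o
    simp only [List.foldl_cons, pvWFold]
    have : pvBOrderStep (PySem.Set.ofList tw) (o, o) x = (pvOStep tw o x, pvOStep tw o x) := by
      unfold pvBOrderStep pvOStep
      by_cases hx : x ∈ tw ∧ x ∉ o
      · rw [if_pos (by simpa [PySem.Set.mem_ofList] using hx), if_pos hx]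
        simp [PySem.Set.add_of_not_mem hx.2]
      · rw [if_neg (by simpa [PySem.Set.mem_ofList] using hx), if_neg hx]
    rw [this, ih (pvOStep tw o x)]
    rfl

theorem pvPairFold_articles (tw : List String) (aw : List (String × List String)) :
    ∀ (o : List String),
      aw.foldl (fun st fw => fw.2.foldl (pvBOrderStep (PySem.Set.ofList tw)) st) (o, o)
        = (pvAFold tw aw o, pvAFold tw aw o) := by
  induction aw with
  | nil => intro o; simp [pvAFold]
  | cons fw rest ih =>
    intro o
    simp only [List.foldl_cons, pvAFold]
    rw [pvPairFold_words tw fw.2 o, ih (pvWFold tw fw.2 o)]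
    rfl

-- one article of A's loop, tracked against the order fold; S records the words that
-- already received this filename
theorem pvInner (tw : List String) (f : String) (ws : List String) :
    ∀ (d : PySem.Dict String (List String)) (o S : List String) (v : String → List String),
      o.Nodup → (∀ w ∈ o, w ∈ tw) → (∀ w, f ∉ v w) → (∀ w, w ∉ o → v w = []) → S ⊆ o →
      d.items = o.map (fun w => (w, v w ++ (if w ∈ S then [f] else []))) →
      (ws.foldl (pvAStep tw f) d).items
        = (pvWFold tw ws o).map (fun w => (w, v w ++ (if w ∈ S ∨ w ∈ ws then [f] else []))) := by
  induction ws with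
  | nil =>
    intro d o S v h1 h2 h3 h4 h5 h6
    simp only [List.foldl_nil, pvWFold]
    rw [h6]
    apply List.map_congr_left
    intro w hw
    simp
  | cons wd ws ih =>
    intro d o S v h1 h2 h3 h4 h5 h6
    have hkeys : d.keys = o := by
      have : d.keys = d.items.map Prod.fst := rfl
      rw [this, h6, List.map_map]
      exact List.map_id o
    have hknd : d.keys.Nodup := by rw [hkeys]; exact h1
    simp only [List.foldl_cons]
    rw [show pvWFold tw (wd :: ws) o = pvWFold tw ws (pvOStep tw o wd) from rfl]
    by_cases htw : wd ∈ tw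
    · by_cases ho : wd ∈ o
      · have hno : pvOStep tw o wd = o := by unfold pvOStep; rw [if_neg (by tauto)]
        have hmem : (wd, v wd ++ (if wd ∈ S then [f] else [])) ∈ d.items := by
          rw [h6]
          exact List.mem_map_of_mem ho
        have hget : d.getD wd [] = v wd ++ (if wd ∈ S then [f] else []) :=
          PySem.Dict.getD_of_mem_items d hmem hknd []
        have hcont : d.contains wd = true := by
          rw [PySem.Dict.contains_iff_mem_keys d wd, hkeys]; exact ho
        by_cases hS : wd ∈ S
        · -- filename already recorded for wd: the step only rewrites wd's entry with itself
          have hcur : d.getD wd [] = v wd ++ [f] := by rw [hget, if_pos hS]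
          have hf : f ∈ d.getD wd [] := by rw [hcur]; simp
          have hstep : pvAStep tw f d wd = d.insert wd (d.getD wd []) := by
            simp only [pvAStep, if_pos htw]
            rw [if_pos hf]
          have hitems : (d.insert wd (d.getD wd [])).items
              = o.map (fun w => (w, v w ++ (if w ∈ S then [f] else []))) := by
            rw [PySem.Dict.items_insert_of_contains d _ hcont, h6, List.map_map]
            apply List.map_congr_left
            intro w hw
            by_cases hwwd : w = wd
            · subst hwwd
              simp [hget]
            · simp [hwwd]
          rw [hstep, hno, ih _ o S v h1 h2 h3 h4 h5 hitems]
          apply List.map_congr_left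
          intro w hw
          congr 2
          apply if_congr _ rfl rfl
          simp only [List.mem_cons]
          constructor
          · tauto
          · rintro (h | rfl | h) <;> tauto
        · -- first occurrence of wd in this article: append f to wd's entry
          have hcur : d.getD wd [] = v wd := by rw [hget, if_neg hS, List.append_nil]
          have hf : f ∉ d.getD wd [] := by rw [hcur]; exact h3 wd
          have hstep : pvAStep tw f d wd
              = (d.insert wd (d.getD wd [])).insert wd (d.getD wd [] ++ [f]) := by
            simp only [pvAStep, if_pos htw]
            rw [if_neg hf]
          have hitems : ((d.insert wd (d.getD wd [])).insert wd (d.getD wd [] ++ [f])).items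
              = o.map (fun w => (w, v w ++ (if w ∈ S ++ [wd] then [f] else []))) := by
            rw [PySem.Dict.insert_insert_self,
              PySem.Dict.items_insert_of_contains d _ hcont, h6, List.map_map]
            apply List.map_congr_left
            intro w hw
            by_cases hwwd : w = wd
            · subst hwwd
              simp [hcur]
            · simp [hwwd]
          have hsub : S ++ [wd] ⊆ o := by
            intro a ha
            rcases List.mem_append.1 ha with h | h
            · exact h5 h
            · simp only [List.mem_singleton] at h
              exact h ▸ ho
          rw [hstep, hno, ih _ o (S ++ [wd]) v h1 h2 h3 h4 hsub hitems]
          apply List.map_congr_left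
          intro w hw
          congr 2
          apply if_congr _ rfl rfl
          simp only [List.mem_append, List.mem_cons]
          tauto
      · -- a brand-new key: the defaultdict access appends (wd, []), then f is appended
        have hno : pvOStep tw o wd = o ++ [wd] := by unfold pvOStep; rw [if_pos ⟨htw, ho⟩]
        have hnc : d.contains wd = false := by
          rw [Bool.eq_false_iff]
          intro hc
          exact ho (hkeys ▸ (PySem.Dict.contains_iff_mem_keys d wd).1 hc)
        have hget : d.getD wd [] = [] := PySem.Dict.getD_of_not_contains d [] hnc
        have hf : f ∉ d.getD wd [] := by rw [hget]; simp
        have hstep : pvAStep tw f d wd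
            = (d.insert wd (d.getD wd [])).insert wd (d.getD wd [] ++ [f]) := by
          simp only [pvAStep, if_pos htw]
          rw [if_neg hf]
        have hitems : ((d.insert wd (d.getD wd [])).insert wd (d.getD wd [] ++ [f])).items
            = (o ++ [wd]).map (fun w => (w, v w ++ (if w ∈ S ++ [wd] then [f] else []))) := by
          rw [PySem.Dict.insert_insert_self,
            PySem.Dict.items_insert_of_not_contains d _ hnc, h6, hget, List.map_append]
          congr 1
          · apply List.map_congr_left
            intro w hw
            have hwwd : w ≠ wd := fun e => ho (e ▸ hw)
            simp [hwwd]
          · simp [h4 wd ho]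
        have h1' : (o ++ [wd]).Nodup := by
          refine h1.append (List.nodup_singleton wd) ?_
          intro a ha hax
          simp only [List.mem_singleton] at hax
          exact ho (hax ▸ ha)
        have h2' : ∀ w ∈ o ++ [wd], w ∈ tw := by
          intro w hw
          rcases List.mem_append.1 hw with h | h
          · exact h2 w h
          · simp only [List.mem_singleton] at h
            exact h ▸ htw
        have h4' : ∀ w, w ∉ o ++ [wd] → v w = [] := by
          intro w hw
          exact h4 w (fun hwo => hw (List.mem_append.2 (Or.inl hwo)))
        have hsub : S ++ [wd] ⊆ o ++ [wd] := by
          intro a ha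
          rcases List.mem_append.1 ha with h | h
          · exact List.mem_append.2 (Or.inl (h5 h))
          · exact List.mem_append.2 (Or.inr h)
        rw [hstep, hno, ih _ (o ++ [wd]) (S ++ [wd]) v h1' h2' h3 h4' hsub hitems]
        apply List.map_congr_left
        intro w hw
        congr 2
        apply if_congr _ rfl rfl
        simp only [List.mem_append, List.mem_cons]
        tauto
    · -- word not a target word: both programs skip it
      have hstep : pvAStep tw f d wd = d := by simp [pvAStep, htw]
      have hno : pvOStep tw o wd = o := by unfold pvOStep; rw [if_neg (by tauto)]
      rw [hstep, hno, ih d o S v h1 h2 h3 h4 h5 h6]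
      apply List.map_congr_left
      intro w hw
      have hwtw : w ∈ tw := by
        rcases (pvWFold_mem tw ws o w).1 hw with h | h
        · exact h2 w h
        · exact h.2
      have hwne : w ≠ wd := fun e => htw (e ▸ hwtw)
      congr 2
      apply if_congr _ rfl rfl
      simp only [List.mem_cons]
      constructor
      · tauto
      · rintro (h | rfl | h) <;> tauto

-- A's whole loop, against the order fold and the per-word filter comprehension
theorem pvOuter (tw : List String) (aw : List (String × List String)) :
    ∀ (d : PySem.Dict String (List String)) (o : List String) (v : String → List String),
      o.Nodup → (∀ w ∈ o, w ∈ tw) → (∀ w, w ∉ o → v w = []) →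
      (aw.map Prod.fst).Nodup → (∀ fw ∈ aw, ∀ w, fw.1 ∉ v w) →
      d.items = o.map (fun w => (w, v w)) →
      (aw.foldl (fun d fw => fw.2.foldl (pvAStep tw fw.1) d) d).items
        = (pvAFold tw aw o).map
            (fun w => (w, v w ++ (aw.filter (fun fw => w ∈ fw.2)).map Prod.fst)) := by
  induction aw with
  | nil =>
    intro d o v h1 h2 h3 h4 h5 h6
    simp only [List.foldl_nil, pvAFold, List.filter_nil, List.map_nil, List.append_nil]
    exact h6
  | cons fw rest ih =>
    intro d o v h1 h2 h3 h4 h5 h6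
    simp only [List.foldl_cons]
    rw [show pvAFold tw (fw :: rest) o = pvAFold tw rest (pvWFold tw fw.2 o) from rfl]
    have hfresh : ∀ w, fw.1 ∉ v w := h5 fw List.mem_cons_self
    have hrep : d.items
        = o.map (fun w => (w, v w ++ (if w ∈ ([] : List String) then [fw.1] else []))) := by
      rw [h6]
      apply List.map_congr_left
      intro w hw
      simp
    have hin := pvInner tw fw.1 fw.2 d o [] v h1 h2 hfresh h3
      (by intro a ha; simp at ha) hrep
    have h1' : (pvWFold tw fw.2 o).Nodup := pvWFold_nodup tw fw.2 o h1
    have h2' : ∀ w ∈ pvWFold tw fw.2 o, w ∈ tw := by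
      intro w hw
      rcases (pvWFold_mem tw fw.2 o w).1 hw with h | h
      · exact h2 w h
      · exact h.2
    have h3' : ∀ w, w ∉ pvWFold tw fw.2 o →
        (fun w => v w ++ (if w ∈ fw.2 ∧ w ∈ tw then [fw.1] else [])) w = [] := by
      intro w hw
      have hwo : w ∉ o := fun h => hw ((pvWFold_mem tw fw.2 o w).2 (Or.inl h))
      have hwc : ¬(w ∈ fw.2 ∧ w ∈ tw) := fun h => hw ((pvWFold_mem tw fw.2 o w).2 (Or.inr h))
      simp only
      rw [h3 w hwo, if_neg hwc]
      rfl
    have h4' : (rest.map Prod.fst).Nodup := (List.nodup_cons.1 (by simpa using h4)).2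
    have hf1 : fw.1 ∉ rest.map Prod.fst := (List.nodup_cons.1 (by simpa using h4)).1
    have h5' : ∀ fw' ∈ rest, ∀ w,
        fw'.1 ∉ (fun w => v w ++ (if w ∈ fw.2 ∧ w ∈ tw then [fw.1] else [])) w := by
      intro fw' hfw' w
      simp only [List.mem_append]
      rintro (h | h)
      · exact h5 fw' (List.mem_cons_of_mem _ hfw') w h
      · by_cases hc : w ∈ fw.2 ∧ w ∈ tw
        · rw [if_pos hc] at h
          simp only [List.mem_singleton] at h
          exact hf1 (h ▸ List.mem_map_of_mem hfw')
        · rw [if_neg hc] at h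
          simp at h
    have hrep' : (fw.2.foldl (pvAStep tw fw.1) d).items
        = (pvWFold tw fw.2 o).map
            (fun w => (w, (fun w => v w ++ (if w ∈ fw.2 ∧ w ∈ tw then [fw.1] else [])) w)) := by
      rw [hin]
      apply List.map_congr_left
      intro w hw
      have hwtw := h2' w hw
      simp only
      congr 2
      apply if_congr _ rfl rfl
      simp [hwtw]
    rw [ih _ (pvWFold tw fw.2 o) _ h1' h2' h3' h4' h5' hrep']
    apply List.map_congr_left
    intro w hw
    have hwtw : w ∈ tw := pvAFold_mem_tw tw rest (pvWFold tw fw.2 o) w h2' hw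
    by_cases hwf : w ∈ fw.2
    · simp [hwf, hwtw]
    · simp [hwf]

-- one article of B's second pass: each key present in the article gets the filename once
theorem pvBInner (f : String) (l : List String) :
    ∀ (d : PySem.Dict String (List String)) (o : List String) (v : String → List String),
      l.Nodup → o.Nodup → d.items = o.map (fun w => (w, v w)) →
      (l.foldl (pvBCollectStep f) d).items
        = o.map (fun w => (w, v w ++ (if w ∈ l then [f] else []))) := by
  induction l with
  | nil =>
    intro d o v hnd h1 h6
    simp only [List.foldl_nil]
    rw [h6]
    apply List.map_congr_left
    intro w hw
    simp
  | cons x rest ih =>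
    intro d o v hnd h1 h6
    have hxrest : x ∉ rest := (List.nodup_cons.1 hnd).1
    have hrnd : rest.Nodup := (List.nodup_cons.1 hnd).2
    have hkeys : d.keys = o := by
      have : d.keys = d.items.map Prod.fst := rfl
      rw [this, h6, List.map_map]
      exact List.map_id o
    have hknd : d.keys.Nodup := by rw [hkeys]; exact h1
    simp only [List.foldl_cons]
    by_cases ho : x ∈ o
    · have hcont : d.contains x = true := by
        rw [PySem.Dict.contains_iff_mem_keys d x, hkeys]; exact ho
      have hget : d.getD x [] = v x :=
        PySem.Dict.getD_of_mem_items d (by rw [h6]; exact List.mem_map_of_mem ho) hknd []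
      have hstep : pvBCollectStep f d x = d.insert x (v x ++ [f]) := by
        have hmi : d.modify x [] (· ++ [f]) = d.insert x (d.getD x [] ++ [f]) :=
          PySem.Dict.ext_iff.mpr rfl
        simp only [pvBCollectStep, hcont, if_true, hmi, hget]
      have hitems : (d.insert x (v x ++ [f])).items
          = o.map (fun w => (w, (fun w => if w = x then v w ++ [f] else v w) w)) := by
        rw [PySem.Dict.items_insert_of_contains d _ hcont, h6, List.map_map]
        apply List.map_congr_left
        intro w hw
        by_cases hwx : w = x
        · subst hwx; simp
        · simp [hwx]
      rw [hstep, ih _ o _ hrnd h1 hitems]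
      apply List.map_congr_left
      intro w hw
      by_cases hwx : w = x
      · subst hwx
        simp [hxrest]
      · simp [hwx]
    · have hcont : d.contains x = false := by
        rw [Bool.eq_false_iff]
        intro hc
        exact ho (hkeys ▸ (PySem.Dict.contains_iff_mem_keys d x).1 hc)
      have hstep : pvBCollectStep f d x = d := by
        simp [pvBCollectStep, hcont]
      rw [hstep, ih _ o _ hrnd h1 h6]
      apply List.map_congr_left
      intro w hw
      have hwx : w ≠ x := fun e => ho (e ▸ hw)
      simp [hwx]

-- B's whole second pass: the value at each key is that key's filter comprehension
theorem pvBOuter (aw : List (String × List String)) :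
    ∀ (d : PySem.Dict String (List String)) (o : List String) (v : String → List String),
      o.Nodup → d.items = o.map (fun w => (w, v w)) →
      (aw.foldl (fun d fw => (PySem.List.dedup fw.2).foldl (pvBCollectStep fw.1) d) d).items
        = o.map (fun w => (w, v w ++ (aw.filter (fun fw => w ∈ fw.2)).map Prod.fst)) := by
  induction aw with
  | nil =>
    intro d o v h1 h6
    simp only [List.foldl_nil, List.filter_nil, List.map_nil, List.append_nil]
    exact h6
  | cons fw rest ih =>
    intro d o v h1 h6
    simp only [List.foldl_cons]
    have hin := pvBInner fw.1 (PySem.List.dedup fw.2) d o v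
      (PySem.List.nodup_dedup fw.2) h1 h6
    have hrep : ((PySem.List.dedup fw.2).foldl (pvBCollectStep fw.1) d).items
        = o.map (fun w => (w, (fun w => v w ++ (if w ∈ fw.2 then [fw.1] else [])) w)) := by
      rw [hin]
      apply List.map_congr_left
      intro w hw
      simp only
      congr 2
      apply if_congr _ rfl rfl
      exact PySem.List.mem_dedup fw.2 w
    rw [ih _ o _ h1 hrep]
    apply List.map_congr_left
    intro w hw
    by_cases hwf : w ∈ fw.2
    · simp [hwf]
    · simp [hwf]

-- ===== VERDICT (by name: the statement is the Claim_ definition above) =====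
theorem find_article_examples_spec : Claim_equal_find_article_examples := by
  intro aw tw _ hpre
  unfold Spec_find_article_examples find_article_examples find_article_examples_alt
  have hA := pvOuter tw aw PySem.Dict.empty [] (fun _ => [])
    (by simp) (by simp) (fun _ _ => rfl) hpre (by simp) rfl
  rw [hA]
  rw [show (([], PySem.Set.empty) : List String × PySem.Set String) = (([], []) : List String × List String) from rfl]
  rw [pvPairFold_articles tw aw []]
  rw [show (pvAFold tw aw [], pvAFold tw aw []).1 = pvAFold tw aw [] from rfl]
  have hd0 : ((pvAFold tw aw []).foldl
      (fun d w => d.insert w ([] : List String)) PySem.Dict.empty).items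
      = (pvAFold tw aw []).map (fun w => (w, ([] : List String))) := by
    rw [PySem.Dict.items_foldl_insert_fresh (l := pvAFold tw aw []) (k := fun w => w)
      (v := fun _ => ([] : List String)) (d := PySem.Dict.empty)
      (fun a _ => PySem.Dict.contains_empty a)
      (by simpa using pvAFold_nodup tw aw [] List.nodup_nil)]
    rfl
  rw [pvBOuter aw _ (pvAFold tw aw []) (fun _ => [])
    (pvAFold_nodup tw aw [] List.nodup_nil) hd0]
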